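-- pv_equiv track=rewrite | github.com/YuJinUk/Algorithm | programmers/Lv2/멀리 뛰기.py | solution
-- ===== SOURCE A (Python) =====
-- def solution(n):
--     if n == 1:
--         return 1
--     elif n == 2:
--         return 2
--     li = [1,2] # 1과 2를 만들기 위한 경우의수를 list로 만들어둠
--     for i in range(2,n):
--         li.append(li[i-2]+li[i-1]) # (i-1)번째에 1을 더하거나 (i-2)번째에 2를 더하여 i번째 경우의 수를 구한다.
--     return li[-1]%1234567
-- ===== SOURCE B (Python) =====
-- def solution(n):
--     # number of jump sequences = Fibonacci: ways(n) = F(n+1) with F(0)=0, F(1)=1,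
--     # computed mod 1234567 by fast doubling in O(log n).
--     if n < 0:
--         return 0
--     def fib_pair(k):
--         # returns (F(k) % 1234567, F(k+1) % 1234567)
--         if k == 0:
--             return (0, 1)
--         a, b = fib_pair(k // 2)
--         c = a * (2 * b - a) % 1234567
--         d = (a * a + b * b) % 1234567
--         if k % 2:
--             return (d, (c + d) % 1234567)
--         else:
--             return (c, d)
--     return fib_pair(n + 1)[0]
-- ===== Notes on version B (the rewrite author's own statement) =====
-- stated objective: faster
-- what changed: Replaced the O(n) DP list of all intermediate Fibonacci big-ints with recursive fast doubling that keeps every intermediate reduced mod 1234567, computing F(n+1) mod 1234567 in O(log n) modular multiplications.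
-- intended difference: For n <= 0 A returns 2, the leftover last element of its seed list [1,2] whose loop never runs, while B returns the intended number of jump sequences (1 for n = 0, 0 for negative n). — e.g. on solution(0): A returns 2, B returns 1
import Mathlib
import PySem

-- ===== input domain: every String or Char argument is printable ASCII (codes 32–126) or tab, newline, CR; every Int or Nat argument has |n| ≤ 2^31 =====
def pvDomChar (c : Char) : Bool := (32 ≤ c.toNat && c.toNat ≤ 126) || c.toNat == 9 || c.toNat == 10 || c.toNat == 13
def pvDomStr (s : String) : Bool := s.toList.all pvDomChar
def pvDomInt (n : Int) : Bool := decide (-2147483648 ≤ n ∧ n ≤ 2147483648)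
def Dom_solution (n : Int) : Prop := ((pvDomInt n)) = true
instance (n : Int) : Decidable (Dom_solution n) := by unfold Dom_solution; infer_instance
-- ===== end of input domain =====

-- B replaces A's O(n) DP list of unreduced big-int Fibonacci values by fast doubling
-- mod 1234567; for n ≤ 0 B returns the intended count instead of A's leftover 2.

-- ===== PORT A =====
def solution (n : Int) : Int :=
  if n = 1 then 1
  else if n = 2 then 2
  else
    let li := (PySem.List.pyRange 2 n 1).foldl
      (fun li i => li ++ [PySem.List.pyGetD li (i - 2) 0 + PySem.List.pyGetD li (i - 1) 0])
      [1, 2]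
    PySem.Int.mod (PySem.List.pyGetD li (-1) 0) 1234567

-- ===== PORT B =====
-- fib_pair k = (F(k) % 1234567, F(k+1) % 1234567) by fast doubling; k = n+1 ≥ 0 here,
-- so the Python recursion on k // 2 is exactly this Nat recursion.
def fibPair : Nat → Int × Int
  | 0 => (0, 1)
  | (k + 1) =>
    let p := fibPair ((k + 1) / 2)
    let a := p.1
    let b := p.2
    let c := PySem.Int.mod (a * (2 * b - a)) 1234567
    let d := PySem.Int.mod (a * a + b * b) 1234567
    if (k + 1) % 2 = 1 then (d, PySem.Int.mod (c + d) 1234567) else (c, d)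
  termination_by k => k
  decreasing_by exact Nat.div_lt_self (Nat.succ_pos k) (by norm_num)

def solution_alt (n : Int) : Int :=
  if n < 0 then 0
  else (fibPair (n + 1).toNat).1

-- ===== PRECONDITION & SPEC =====
-- For n ≤ 0 A returns 2 (the leftover last element of its seed list [1,2], whose loop never
-- runs), while B returns the intended number of jump sequences: 1 for n = 0, 0 for n < 0.
def D_solution (n : Int) : Prop := n ≤ 0
instance (n : Int) : Decidable (D_solution n) := by unfold D_solution; infer_instance

def Spec_solution (n : Int) (out : Int) : Prop := ¬ D_solution n → out = solution_alt n
instance (n : Int) (out : Int) : Decidable (Spec_solution n out) := by unfold Spec_solution; infer_instance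

def pvDiffWitness_solution : Int := 0
def pvDiffWitnessOut_solution : Int × Int := (2, 1)

-- ===== CLAIM (what is proved, stated in full; the proofs are below) =====
def Claim_unchanged_solution : Prop := ∀ (n : Int), Dom_solution n → Spec_solution n (solution n)
def Claim_changed_solution : Prop := Dom_solution (pvDiffWitness_solution) ∧ D_solution (pvDiffWitness_solution) ∧ solution (pvDiffWitness_solution) = pvDiffWitnessOut_solution.1 ∧ solution_alt (pvDiffWitness_solution) = pvDiffWitnessOut_solution.2 ∧ pvDiffWitnessOut_solution.1 ≠ pvDiffWitnessOut_solution.2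
def Claim_exact_solution : Prop := ∀ (n : Int), Dom_solution n → D_solution n → solution n ≠ solution_alt n

-- ===== LEMMAS AND PROOFS =====

theorem pymod_eq (x : Int) : PySem.Int.mod x 1234567 = x % 1234567 :=
  PySem.Int.mod_eq_emod_of_pos (by norm_num)

-- fast doubling computes Fibonacci mod 1234567
theorem fibPair_eq (k : Nat) :
    fibPair k = ((Nat.fib k : Int) % 1234567, (Nat.fib (k + 1) : Int) % 1234567) := by
  induction k using Nat.strong_induction_on with
  | _ k ih =>
    match k with
    | 0 => simp [fibPair]
    | (j + 1) =>
      have hm := ih ((j + 1) / 2) (Nat.div_lt_self (Nat.succ_pos j) (by norm_num))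
      rw [fibPair, hm]
      simp only [pymod_eq]
      set m := (j + 1) / 2 with hmdef
      set M : Int := 1234567 with hMdef
      set x : Int := (Nat.fib m : Int) with hx
      set y : Int := (Nat.fib (m + 1) : Int) with hy
      have ha : Int.ModEq M (x % M) x := Int.emod_emod_of_dvd x dvd_rfl
      have hb : Int.ModEq M (y % M) y := Int.emod_emod_of_dvd y dvd_rfl
      have hle : Nat.fib m ≤ 2 * Nat.fib (m + 1) := by
        have := Nat.fib_mono (Nat.le_succ m)
        simp only [Nat.succ_eq_add_one] at this
        omega
      have hdbl : (Nat.fib (2 * m) : Int) = x * (2 * y - x) := by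
        rw [Nat.fib_two_mul, hx, hy]
        push_cast [hle]; ring
      have hdbl1 : (Nat.fib (2 * m + 1) : Int) = x * x + y * y := by
        rw [Nat.fib_two_mul_add_one, hx, hy]
        push_cast; ring
      have hc : Int.ModEq M ((x % M) * (2 * (y % M) - x % M)) (x * (2 * y - x)) :=
        ha.mul (((hb.mul_left 2)).sub ha)
      have hd : Int.ModEq M ((x % M) * (x % M) + (y % M) * (y % M)) (x * x + y * y) :=
        (ha.mul ha).add (hb.mul hb)
      have hc' : Int.ModEq M ((x % M) * (2 * (y % M) - x % M) % M) (x * (2 * y - x)) :=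
        Int.ModEq.trans (Int.emod_emod_of_dvd _ dvd_rfl) hc
      have hd' : Int.ModEq M (((x % M) * (x % M) + (y % M) * (y % M)) % M) (x * x + y * y) :=
        Int.ModEq.trans (Int.emod_emod_of_dvd _ dvd_rfl) hd
      by_cases hpar : (j + 1) % 2 = 1
      · have h2 : j + 1 = 2 * m + 1 := by omega
        rw [if_pos hpar]
        simp only [Prod.mk.injEq]
        constructor
        · rw [h2, hdbl1]; exact hd
        · have h3 : j + 1 + 1 = 2 * m + 1 + 1 := by omega
          have hfib : (Nat.fib (j + 1 + 1) : Int) = x * (2 * y - x) + (x * x + y * y) := by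
            rw [h3, Nat.fib_add_two, Nat.cast_add, hdbl, hdbl1]
          rw [hfib]
          exact Int.ModEq.add hc' hd' 
      · have h2 : j + 1 = 2 * m := by omega
        rw [if_neg hpar]
        simp only [Prod.mk.injEq]
        constructor
        · rw [h2, hdbl]; exact hc
        · have h3 : j + 1 + 1 = 2 * m + 1 := by omega
          rw [h3, hdbl1]; exact hd

-- A's loop builds the list [fib 2, fib 3, …, fib (m+1)] of jump counts
theorem loopA (m : Nat) (h : 2 ≤ m) :
    (PySem.List.pyRange 2 (m : Int) 1).foldl
      (fun li i => li ++ [PySem.List.pyGetD li (i - 2) 0 + PySem.List.pyGetD li (i - 1) 0])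
      [1, 2]
    = (List.range m).map (fun i => (Nat.fib (i + 2) : Int)) := by
  induction m, h using Nat.le_induction with
  | base =>
    rw [show ((2 : Nat) : Int) = 2 by norm_num, PySem.List.pyRange_one_eq_nil (by norm_num)]
    simp [List.range_succ, Nat.fib]
  | succ m hm ih =>
    have hcast : ((m + 1 : Nat) : Int) = (m : Int) + 1 := by push_cast; ring
    rw [hcast, PySem.List.pyRange_one_succ_right (by exact_mod_cast hm), List.foldl_append,
        ih, List.foldl_cons, List.foldl_nil]
    have e2 : (m : Int) - 2 = ((m - 2 : Nat) : Int) := by omega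
    have e1 : (m : Int) - 1 = ((m - 1 : Nat) : Int) := by omega
    rw [e2, e1, PySem.List.pyGetD_natCast, PySem.List.pyGetD_natCast]
    have g1 : ((List.range m).map (fun i => (Nat.fib (i + 2) : Int))).getD (m - 2) 0
        = (Nat.fib m : Int) := by
      rw [List.getD_eq_getElem?_getD]
      simp [show m - 2 < m by omega, show m - 2 + 2 = m by omega]
    have g2 : ((List.range m).map (fun i => (Nat.fib (i + 2) : Int))).getD (m - 1) 0
        = (Nat.fib (m + 1) : Int) := by
      rw [List.getD_eq_getElem?_getD]
      simp [show m - 1 < m by omega, show m - 1 + 2 = m + 1 by omega]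
    rw [g1, g2, List.range_succ, List.map_append]
    simp [Nat.fib_add_two, Nat.cast_add]

-- ===== VERDICT (by name: the statement is the Claim_ definition above) =====
theorem solution_spec : Claim_unchanged_solution := by
  intro n _ hD
  have hn : 1 ≤ n := by
    unfold D_solution at hD; omega
  unfold solution solution_alt
  by_cases h1 : n = 1
  · subst h1
    rw [if_pos rfl, if_neg (by norm_num),
        show ((1 : Int) + 1).toNat = 2 by decide, fibPair_eq]
    decide
  · by_cases h2 : n = 2
    · subst h2
      rw [if_neg (by norm_num), if_pos rfl, if_neg (by norm_num),
          show ((2 : Int) + 1).toNat = 3 by decide, fibPair_eq]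
      decide
    · have hn3 : 3 ≤ n := by omega
      rw [if_neg h1, if_neg h2, if_neg (by omega)]
      have hmn : n = ((n.toNat : Int)) := by omega
      set m : Nat := n.toNat with hmdef
      have hm3 : 3 ≤ m := by omega
      rw [hmn]
      simp only [loopA m (by omega)]
      rw [PySem.List.pyGetD_neg_ofNat _ 1 0 (by omega)
            (by rw [List.length_map, List.length_range]; omega)]
      have hlast : ((List.range m).map (fun i => (Nat.fib (i + 2) : Int)))[((List.range m).map (fun i => (Nat.fib (i + 2) : Int))).length - 1]'(by simp; omega) = (Nat.fib (m + 1) : Int) := by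
        simp only [List.length_map, List.length_range]
        rw [List.getElem_map, List.getElem_range, show m - 1 + 2 = m + 1 by omega]
      rw [hlast]
      rw [pymod_eq]
      rw [show ((m : Int) + 1).toNat = m + 1 by omega]
      rw [fibPair_eq]

theorem solution_changed : Claim_changed_solution := by
  unfold Claim_changed_solution
  refine ⟨by decide, by decide, by decide, ?_, by decide⟩
  show solution_alt 0 = 1
  unfold solution_alt
  rw [if_neg (by norm_num), show ((0 : Int) + 1).toNat = 1 by decide, fibPair_eq]
  decide

theorem solution_tight : Claim_exact_solution := by
  intro n _ hD
  have hn : n ≤ 0 := hD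
  have hA : solution n = 2 := by
    unfold solution
    rw [if_neg (by omega), if_neg (by omega),
        PySem.List.pyRange_one_eq_nil (by omega), List.foldl_nil]
    decide
  by_cases h0 : n = 0
  · subst h0
    have hB : solution_alt 0 = 1 := by
      unfold solution_alt
      rw [if_neg (by norm_num), show ((0 : Int) + 1).toNat = 1 by decide, fibPair_eq]
      decide
    rw [hA, hB]; norm_num
  · have hB : solution_alt n = 0 := by
      unfold solution_alt
      rw [if_pos (by omega)]
    rw [hA, hB]; norm_num
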